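-- pv_equiv track=rewrite | github.com/zwt0204/python_ | LeetCode/二分法.py | right_bin_search
-- ===== SOURCE A (Python) =====
-- def right_bin_search(nums, target):
--     length = len(nums) - 1
--     if length == 0:
--         return -1
--     left = 0
--     right = length
--     while left <= right:
--         mid = (left + right) // 2
--         if nums[mid] < target:
--             left = mid + 1
--         elif nums[mid] > target:
--             right = right - 1
--         elif nums[mid] == target:
--             left = mid + 1
--         # 检查越界
--     if right < 0 or nums[right] != target:
--         return -1
--     return left
-- ===== SOURCE B (Python) =====
-- def right_bin_search(nums, target):
--     # On a sorted list, the index after the last occurrence of target is just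
--     # the number of elements <= target: one counting pass, no search window at all.
--     ub = sum(1 for x in nums if x <= target)
--     if ub == 0 or nums[ub - 1] != target:
--         return -1
--     return ub
-- ===== Notes on version B (the rewrite author's own statement) =====
-- stated objective: simpler
-- what changed: A runs a stateful search-window loop (binary probe that shrinks right one step at a time) plus a special one-element guard; B does no search at all: it counts the elements <= target in one pass, which on sorted input is exactly the index after the last occurrence.
-- intended difference: On single-element lists [t] with target t, A returns -1 because of its 'if len(nums)-1 == 0: return -1' guard, while B returns 1, the index after the last occurrence, which is the intended answer. — e.g. on right_bin_search([5], 5): A returns -1, B returns 1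
-- outside the precondition, e.g. on right_bin_search([1, 0, 1, 0, 0], 0): A returns 2, B returns -1
import Mathlib
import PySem

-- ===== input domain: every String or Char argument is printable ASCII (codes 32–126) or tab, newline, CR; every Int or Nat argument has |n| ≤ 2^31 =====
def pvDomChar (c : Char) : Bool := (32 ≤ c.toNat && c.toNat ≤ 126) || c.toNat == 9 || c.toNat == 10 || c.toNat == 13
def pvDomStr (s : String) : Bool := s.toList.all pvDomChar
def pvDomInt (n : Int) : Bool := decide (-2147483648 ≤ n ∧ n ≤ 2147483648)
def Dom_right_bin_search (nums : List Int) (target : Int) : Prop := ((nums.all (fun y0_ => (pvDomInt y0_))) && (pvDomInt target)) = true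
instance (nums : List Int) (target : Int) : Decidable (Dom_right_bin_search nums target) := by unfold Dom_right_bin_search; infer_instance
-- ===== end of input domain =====

-- B replaces A's search-window loop by a single counting pass (number of elements ≤ target), and returns the intended answer on one-element lists (see D_ below).

-- ===== PORT A =====
-- the while loop of A: state (left, right); 'none' branch unreachable (Python would raise IndexError)
-- fuel only makes the recursion structural; nums.length + 1 always suffices
def rbsLoopA (nums : List Int) (target : Int) : Nat → Int → Int → Int × Int
  | 0, l, r => (l, r)
  | k + 1, l, r =>
    if l ≤ r then
      let mid := PySem.Int.floordiv (l + r) 2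
      match PySem.List.pyGet? nums mid with
      | some v =>
        if v < target then rbsLoopA nums target k (mid + 1) r
        else if v > target then rbsLoopA nums target k l (r - 1)
        else if v = target then rbsLoopA nums target k (mid + 1) r
        else (l, r)
      | none => (l, r)
    else (l, r)

def right_bin_search (nums : List Int) (target : Int) : Int :=
  let length : Int := (nums.length : Int) - 1
  if length = 0 then -1
  else
    let p := rbsLoopA nums target (nums.length + 1) 0 length
    let left := p.1
    let right := p.2
    if right < 0 then -1
    else match PySem.List.pyGet? nums right with
      | some v => if v ≠ target then -1 else left
      | none => -1

-- ===== PORT B =====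
-- sum(1 for x in nums if x <= target) is ported as the library count of that predicate
def right_bin_search_alt (nums : List Int) (target : Int) : Int :=
  let ub : Int := (nums.countP (fun x => decide (x ≤ target)) : Int)
  if ub = 0 then -1
  else match PySem.List.pyGet? nums (ub - 1) with
    | some v => if v ≠ target then -1 else ub
    | none => -1

-- ===== PRECONDITION & SPEC =====
-- Pre_ excludes unsorted lists (on which A still returns a value): a binary search is
-- specified only for sorted input, and A's value on unsorted lists is an accident of its
-- probing order that no caller could rely on.
def Pre_right_bin_search (nums : List Int) (target : Int) : Prop :=
  nums.Pairwise (· ≤ ·)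
instance (nums : List Int) (target : Int) : Decidable (Pre_right_bin_search nums target) := by unfold Pre_right_bin_search; infer_instance

def pvWitness_right_bin_search : List Int × Int := ([1, 2, 2, 3], 2)

-- On single-element lists [t] with target t, A returns -1 because of its
-- 'if len(nums)-1 == 0: return -1' guard, while B returns 1, the index after the last
-- occurrence, which is the intended answer.
def D_right_bin_search (nums : List Int) (target : Int) : Prop :=
  nums.length = 1 ∧ target ∈ nums
instance (nums : List Int) (target : Int) : Decidable (D_right_bin_search nums target) := by unfold D_right_bin_search; infer_instance

def Spec_right_bin_search (nums : List Int) (target : Int) (out : Int) : Prop :=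
  ¬ D_right_bin_search nums target → out = right_bin_search_alt nums target
instance (nums : List Int) (target : Int) (out : Int) : Decidable (Spec_right_bin_search nums target out) := by unfold Spec_right_bin_search; infer_instance

def pvDiffWitness_right_bin_search : List Int × Int := ([5], 5)
def pvDiffWitnessOut_right_bin_search : Int × Int := (-1, 1)

-- ===== CLAIM (what is proved, stated in full; the proofs are below) =====
def Claim_unchanged_right_bin_search : Prop := ∀ (nums : List Int) (target : Int), Dom_right_bin_search nums target → Pre_right_bin_search nums target → Spec_right_bin_search nums target (right_bin_search nums target)
def Claim_changed_right_bin_search : Prop := Dom_right_bin_search (pvDiffWitness_right_bin_search.1) (pvDiffWitness_right_bin_search.2) ∧ Pre_right_bin_search (pvDiffWitness_right_bin_search.1) (pvDiffWitness_right_bin_search.2) ∧ D_right_bin_search (pvDiffWitness_right_bin_search.1) (pvDiffWitness_right_bin_search.2) ∧ right_bin_search (pvDiffWitness_right_bin_search.1) (pvDiffWitness_right_bin_search.2) = pvDiffWitnessOut_right_bin_search.1 ∧ right_bin_search_alt (pvDiffWitness_right_bin_search.1) (pvDiffWitness_right_bin_search.2) = pvDiffWitnessOut_right_bin_search.2 ∧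 pvDiffWitnessOut_right_bin_search.1 ≠ pvDiffWitnessOut_right_bin_search.2
def Claim_exact_right_bin_search : Prop := ∀ (nums : List Int) (target : Int), Dom_right_bin_search nums target → Pre_right_bin_search nums target → D_right_bin_search nums target → right_bin_search nums target ≠ right_bin_search_alt nums target

-- ===== LEMMAS AND PROOFS =====

-- ub = number of elements ≤ target (= B's count, = bisect_right on a sorted list)
def rbsUb (nums : List Int) (target : Int) : Int :=
  (nums.countP (fun x => decide (x ≤ target)) : Int)

theorem rbsUb_nonneg (nums : List Int) (target : Int) : 0 ≤ rbsUb nums target := by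
  simp [rbsUb]

theorem rbsUb_le_length (nums : List Int) (target : Int) :
    rbsUb nums target ≤ (nums.length : Int) := by
  simp [rbsUb]
  exact_mod_cast List.countP_le_length

-- on a sorted list, indices below ub carry elements ≤ target
theorem rbsUb_le (nums : List Int) (target : Int)
    (hs : nums.Pairwise (· ≤ ·)) (i : Nat) (hi : i < nums.length)
    (hlt : (i : Int) < rbsUb nums target) : nums[i] ≤ target := by
  induction nums generalizing i with
  | nil => simp at hi
  | cons x xs ih =>
    have hx : ∀ y ∈ xs, x ≤ y := fun y hy => List.rel_of_pairwise_cons hs hy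
    have hs' : xs.Pairwise (· ≤ ·) := hs.of_cons
    by_cases hxt : x ≤ target
    · cases i with
      | zero => simpa using hxt
      | succ j =>
        have : (j : Int) < rbsUb xs target := by
          simp [rbsUb, List.countP_cons, hxt] at hlt ⊢
          omega
        simpa using ih hs' j (by simpa using hi) this
    · -- x > target, all elements > target, ub = 0
      have hall : xs.countP (fun y => decide (y ≤ target)) = 0 := by
        rw [List.countP_eq_zero]
        intro y hy
        simp only [decide_eq_true_eq]
        intro hyt
        exact hxt (le_trans (hx y hy) hyt)
      simp [rbsUb, List.countP_cons, hxt, hall] at hlt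
      omega

-- on a sorted list, indices at or above ub carry elements > target
theorem rbsUb_gt (nums : List Int) (target : Int)
    (hs : nums.Pairwise (· ≤ ·)) (i : Nat) (hi : i < nums.length)
    (hge : rbsUb nums target ≤ (i : Int)) : target < nums[i] := by
  induction nums generalizing i with
  | nil => simp at hi
  | cons x xs ih =>
    have hx : ∀ y ∈ xs, x ≤ y := fun y hy => List.rel_of_pairwise_cons hs hy
    have hs' : xs.Pairwise (· ≤ ·) := hs.of_cons
    by_cases hxt : x ≤ target
    · cases i with
      | zero =>
        simp [rbsUb, List.countP_cons, hxt] at hge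
        omega
      | succ j =>
        have : rbsUb xs target ≤ (j : Int) := by
          simp [rbsUb, List.countP_cons, hxt] at hge ⊢
          omega
        simpa using ih hs' j (by simpa using hi) this
    · cases i with
      | zero => simpa using lt_of_not_ge hxt
      | succ j =>
        have hj : j < xs.length := by simpa using hi
        have hmem : xs[j] ∈ xs := List.getElem_mem hj
        have h1 : x ≤ xs[j] := hx _ hmem
        have h2 : target < xs[j] := lt_of_lt_of_le (lt_of_not_ge hxt) h1
        simpa using h2

-- A's loop, run from any state satisfying the invariant, exits at (ub, ub - 1)
theorem rbsLoopA_eq (nums : List Int) (target : Int)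
    (hs : nums.Pairwise (· ≤ ·)) :
    ∀ (k : Nat) (l r : Int), (r + 1 - l).toNat ≤ k →
      0 ≤ l → l ≤ rbsUb nums target → rbsUb nums target - 1 ≤ r →
      r < (nums.length : Int) → l ≤ r + 1 →
      rbsLoopA nums target k l r = (rbsUb nums target, rbsUb nums target - 1) := by
  intro k
  induction k with
  | zero =>
    intro l r hk h0 hlu hur hrn hlr
    have : l = rbsUb nums target := by omega
    have : r = rbsUb nums target - 1 := by omega
    simp_all [rbsLoopA]
  | succ k ih =>
    intro l r hk h0 hlu hur hrn hlr
    by_cases hcond : l ≤ r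
    · have hb := PySem.Int.floordiv_two_mid_bounds hcond
      set mid := PySem.Int.floordiv (l + r) 2 with hmid
      have hmid0 : 0 ≤ mid := by omega
      have hmidn : mid < (nums.length : Int) := by omega
      have hget : PySem.List.pyGet? nums mid = some (nums[mid.toNat]'(by omega)) :=
        PySem.List.pyGet?_eq_some_getElem nums (by omega) (by omega)
      rw [rbsLoopA]
      simp only [if_pos hcond, ← hmid, hget]
      by_cases hle : nums[mid.toNat] ≤ target
      · -- mid < ub
        have hmu : mid < rbsUb nums target := by
          by_contra hc
          have := rbsUb_gt nums target hs mid.toNat (by omega) (by omega)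
          omega
        have hrec : rbsLoopA nums target k (mid + 1) r = (rbsUb nums target, rbsUb nums target - 1) :=
          ih (mid + 1) r (by omega) (by omega) (by omega) hur hrn (by omega)
        by_cases hlt : nums[mid.toNat] < target
        · rw [if_pos hlt]; exact hrec
        · have heq : nums[mid.toNat] = target := by omega
          rw [if_neg hlt, if_neg (by omega), if_pos heq]; exact hrec
      · -- ub ≤ mid
        have hmu : rbsUb nums target ≤ mid := by
          by_contra hc
          have := rbsUb_le nums target hs mid.toNat (by omega) (by omega)
          omega
        rw [if_neg (by omega), if_pos (by omega)]
        exact ih l (r - 1) (by omega) h0 hlu (by omega) (by omega) (by omega)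
    · rw [rbsLoopA, if_neg hcond]
      have : l = rbsUb nums target := by omega
      have : r = rbsUb nums target - 1 := by omega
      simp_all

-- B is literally the ub-test form
theorem alt_eq (nums : List Int) (target : Int) :
    right_bin_search_alt nums target =
      (if rbsUb nums target = 0 then -1
       else match PySem.List.pyGet? nums (rbsUb nums target - 1) with
         | some v => if v ≠ target then -1 else rbsUb nums target
         | none => -1) := by
  simp only [right_bin_search_alt, rbsUb]

theorem right_bin_search_spec' (nums : List Int) (target : Int)
    (hpre : Pre_right_bin_search nums target)
    (hD : ¬ D_right_bin_search nums target) :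
    right_bin_search nums target = right_bin_search_alt nums target := by
  have hs : nums.Pairwise (· ≤ ·) := hpre
  have hub0 := rbsUb_nonneg nums target
  have hubn := rbsUb_le_length nums target
  rw [alt_eq nums target]
  by_cases hn1 : nums.length = 1
  · -- A returns -1; B must too, since target ∉ nums
    have hmem : target ∉ nums := fun hm => hD ⟨hn1, hm⟩
    rw [right_bin_search]
    rw [if_pos (by omega)]
    by_cases hu : rbsUb nums target = 0
    · rw [if_pos hu]
    · rw [if_neg hu]
      have hget : PySem.List.pyGet? nums (rbsUb nums target - 1) =
          some (nums[(rbsUb nums target - 1).toNat]'(by omega)) :=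
        PySem.List.pyGet?_eq_some_getElem nums (by omega) (by omega)
      rw [hget]
      have hne : (nums[(rbsUb nums target).toNat - 1]'(by omega)) ≠ target := by
        intro he
        exact hmem (he ▸ List.getElem_mem (by omega))
      simp [hne]
  · -- A's loop runs; both sides compute the same ub-test
    have hloop := rbsLoopA_eq nums target hs (nums.length + 1) 0
        ((nums.length : Int) - 1) (by omega) (by omega) (by omega) (by omega) (by omega) (by omega)
    rw [right_bin_search]
    rw [if_neg (by omega)]
    simp only [hloop]
    by_cases hu : rbsUb nums target = 0
    · rw [if_pos (by omega), if_pos hu]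
    · rw [if_neg (by omega), if_neg hu]

-- ===== VERDICT (by name: the statement is the Claim_ definition above) =====
theorem right_bin_search_spec : Claim_unchanged_right_bin_search := by
  intro nums target _hdom hpre hD
  exact right_bin_search_spec' nums target hpre hD

theorem right_bin_search_changed : Claim_changed_right_bin_search := by
  unfold Claim_changed_right_bin_search
  decide

theorem right_bin_search_tight : Claim_exact_right_bin_search := by
  intro nums target _hdom hpre hD
  obtain ⟨hlen, hmem⟩ := hD
  match nums, hlen with
  | [a], _ =>
    have ha : target = a := by simpa using hmem
    subst ha
    have hA : right_bin_search [target] target = -1 := by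
      rw [right_bin_search]
      norm_num
    have hB : right_bin_search_alt [target] target = 1 := by
      simp [right_bin_search_alt, PySem.List.pyGet?, PySem.List.pyIdx?]
    rw [hA, hB]
    norm_num
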